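-- pv_equiv track=rewrite | github.com/Kerollarisa/Test_test | course_tasks.py | analyze_courses
-- ===== SOURCE A (Python) =====
-- def analyze_courses(courses, mentors, durations):
--     """
--     Формирует список курсов (словари с ключами title, mentors, duration).
--     Определяет минимальную и максимальную длительность,
--     находит все курсы с такой длительностью.
--     Возвращает кортеж: (min_duration, max_duration, courses_min, courses_max)
--     """
--     # Создаём список словарей
--     courses_list = []
--     for title, mentors_list, duration in zip(courses, mentors, durations):
--         course_dict = {
--             'title': title,
--             'mentors': mentors_list,
--             'duration': duration
--         }
--         courses_list.append(course_dict)
--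
--     min_duration = min(durations)
--     max_duration = max(durations)
--
--     # Индексы курсов с минимальной/максимальной длительностью
--     min_indices = [i for i, d in enumerate(durations) if d == min_duration]
--     max_indices = [i for i, d in enumerate(durations) if d == max_duration]
--
--     # Названия курсов
--     courses_min = [courses_list[i]['title'] for i in min_indices]
--     courses_max = [courses_list[i]['title'] for i in max_indices]
--
--     return min_duration, max_duration, courses_min, courses_max
-- ===== SOURCE B (Python) =====
-- def analyze_courses(courses, mentors, durations):
--     """Single pass: maintain running min/max and the two title lists as we go,
--     instead of separate min, max, index-filter and title-extraction passes."""
--     mn = mx = durations[0]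
--     courses_min, courses_max = [], []
--     for i, d in enumerate(durations):
--         if d < mn:
--             mn, courses_min = d, [courses[i]]
--         elif d == mn:
--             courses_min.append(courses[i])
--         if d > mx:
--             mx, courses_max = d, [courses[i]]
--         elif d == mx:
--             courses_max.append(courses[i])
--     return mn, mx, courses_min, courses_max
-- ===== Notes on version B (the rewrite author's own statement) =====
-- stated objective: simpler
-- what changed: Replaces A's build-dict-list plus separate min, max, two index-filter passes and two title-extraction passes by one maintain-as-you-go pass over enumerate(durations) that keeps running min/max and the two title lists (reset on a strictly better duration, append on a tie), never building the dict list at all.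
import Mathlib
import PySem

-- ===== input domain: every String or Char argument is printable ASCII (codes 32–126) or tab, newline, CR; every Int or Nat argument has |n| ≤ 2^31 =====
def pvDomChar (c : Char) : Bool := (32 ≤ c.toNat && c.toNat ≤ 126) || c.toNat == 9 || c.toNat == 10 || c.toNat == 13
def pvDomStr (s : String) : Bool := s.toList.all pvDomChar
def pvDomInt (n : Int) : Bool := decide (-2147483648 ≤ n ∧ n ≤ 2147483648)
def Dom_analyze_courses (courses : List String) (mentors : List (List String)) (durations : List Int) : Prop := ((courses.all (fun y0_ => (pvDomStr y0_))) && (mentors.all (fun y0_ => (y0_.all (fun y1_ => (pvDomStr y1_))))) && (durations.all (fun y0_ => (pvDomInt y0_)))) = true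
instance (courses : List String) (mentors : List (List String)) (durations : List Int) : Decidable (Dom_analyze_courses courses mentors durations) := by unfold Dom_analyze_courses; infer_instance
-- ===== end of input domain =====

-- B replaces A's dict-list construction and its separate min/max/filter/extract passes by one
-- maintain-as-you-go pass that keeps running min/max and the two title lists (objective: simpler).

-- ===== PORT A =====
def analyze_courses (courses : List String) (mentors : List (List String)) (durations : List Int) : Int × Int × List String × List String :=
  -- courses_list: fold over zip(courses, mentors, durations), appending the (title, mentors, duration) record
  let courses_list : List (String × List String × Int) :=
    (courses.zip (mentors.zip durations)).foldl (fun acc tmd => acc ++ [(tmd.1, tmd.2.1, tmd.2.2)]) []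
  match PySem.List.min? durations (fun x => x), PySem.List.max? durations (fun x => x) with
  | some min_duration, some max_duration =>
      let min_indices := ((PySem.List.enumerate durations 0).filter (fun p => p.2 == min_duration)).map (fun p => p.1)
      let max_indices := ((PySem.List.enumerate durations 0).filter (fun p => p.2 == max_duration)).map (fun p => p.1)
      -- courses_list[i]['title']; pyGet? = none (IndexError) is excluded by Pre_
      let courses_min := min_indices.map (fun i => ((PySem.List.pyGet? courses_list i).map (fun cd => cd.1)).getD "")
      let courses_max := max_indices.map (fun i => ((PySem.List.pyGet? courses_list i).map (fun cd => cd.1)).getD "")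
      (min_duration, max_duration, courses_min, courses_max)
  | _, _ => (0, 0, [], [])   -- min([]) raises ValueError: excluded by Pre_

-- ===== PORT B =====
-- one loop iteration of Source B: update (mn, mx, courses_min, courses_max) with (i, d)
def bStep (courses : List String) (st : Int × Int × List String × List String) (p : Int × Int) : Int × Int × List String × List String :=
  let title := (PySem.List.pyGet? courses p.1).getD ""   -- courses[i]; IndexError excluded by Pre_
  let mnc := if p.2 < st.1 then (p.2, [title])
             else if p.2 == st.1 then (st.1, st.2.2.1 ++ [title])
             else (st.1, st.2.2.1)
  let mxc := if st.2.1 < p.2 then (p.2, [title])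
             else if p.2 == st.2.1 then (st.2.1, st.2.2.2 ++ [title])
             else (st.2.1, st.2.2.2)
  (mnc.1, mxc.1, mnc.2, mxc.2)

def analyze_courses_alt (courses : List String) (mentors : List (List String)) (durations : List Int) : Int × Int × List String × List String :=
  match durations with
  | [] => (0, 0, [], [])   -- durations[0] raises IndexError in Source B: excluded by Pre_
  | d0 :: _ => (PySem.List.enumerate durations 0).foldl (bStep courses) (d0, d0, [], [])

-- ===== PRECONDITION & SPEC =====
-- Pre_: exactly the inputs where Python A returns normally — durations nonempty (else min([]) raises
-- ValueError) and every index holding an extremal duration lies inside both courses and mentors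
-- (else courses_list[i] raises IndexError, courses_list being truncated by zip).
def Pre_analyze_courses (courses : List String) (mentors : List (List String)) (durations : List Int) : Prop :=
  durations ≠ [] ∧ ∀ k < durations.length,
    (some (durations.getD k 0) = durations.min? ∨ some (durations.getD k 0) = durations.max?) →
    (k < courses.length ∧ k < mentors.length)
instance (courses : List String) (mentors : List (List String)) (durations : List Int) : Decidable (Pre_analyze_courses courses mentors durations) := by unfold Pre_analyze_courses; infer_instance

def pvWitness_analyze_courses : List String × List (List String) × List Int := (["a", "b"], [["x"], ["y"]], [1, 2])

def Spec_analyze_courses (courses : List String) (mentors : List (List String)) (durations : List Int) (out : Int × Int × List String × List String) : Prop := out = analyze_courses_alt courses mentors durations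
instance (courses : List String) (mentors : List (List String)) (durations : List Int) (out : Int × Int × List String × List String) : Decidable (Spec_analyze_courses courses mentors durations out) := by unfold Spec_analyze_courses; infer_instance

-- ===== CLAIM (what is proved, stated in full; the proofs are below) =====
def Claim_equal_analyze_courses : Prop := ∀ (courses : List String) (mentors : List (List String)) (durations : List Int), Dom_analyze_courses courses mentors durations → Pre_analyze_courses courses mentors durations → Spec_analyze_courses courses mentors durations (analyze_courses courses mentors durations)

-- ===== LEMMAS AND PROOFS =====

-- value of min(ds) / max(ds) on a nonempty list, as the running fold A's min?/max? compute
def mval (ds : List Int) : Int := match ds with | [] => 0 | x :: t => t.foldl min x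
def Mval (ds : List Int) : Int := match ds with | [] => 0 | x :: t => t.foldl max x
-- indices of ds holding value v, as A computes them
def idxOf (ds : List Int) (v : Int) : List Int :=
  ((PySem.List.enumerate ds 0).filter (fun p => p.2 == v)).map (fun p => p.1)

theorem mval_append (l : List Int) (hl : l ≠ []) (d : Int) : mval (l ++ [d]) = min (mval l) d := by
  cases l with
  | nil => exact absurd rfl hl
  | cons x t => simp [mval, List.foldl_append]

theorem Mval_append (l : List Int) (hl : l ≠ []) (d : Int) : Mval (l ++ [d]) = max (Mval l) d := by
  cases l with
  | nil => exact absurd rfl hl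
  | cons x t => simp [Mval, List.foldl_append]

theorem mval_le (l : List Int) (x : Int) (hx : x ∈ l) : mval l ≤ x := by
  cases l with
  | nil => simp at hx
  | cons a t => exact PySem.List.min?_isMin (PySem.List.min?_id_cons a t) x hx

theorem le_Mval (l : List Int) (x : Int) (hx : x ∈ l) : x ≤ Mval l := by
  cases l with
  | nil => simp at hx
  | cons a t => exact PySem.List.max?_isMax (PySem.List.max?_id_cons a t) x hx

theorem idxOf_append (l : List Int) (d v : Int) :
    idxOf (l ++ [d]) v =
      idxOf l v ++ (if d = v then [((l.length : Int))] else []) := by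
  simp only [idxOf, PySem.List.enumerate_append, PySem.List.enumerate_cons,
    PySem.List.enumerate_nil, List.filter_append, List.map_append]
  by_cases h : d = v <;> simp [h]

theorem idxOf_nil_of_ne (l : List Int) (v : Int) (h : ∀ x ∈ l, x ≠ v) : idxOf l v = [] := by
  simp only [idxOf, List.map_eq_nil_iff, List.filter_eq_nil_iff]
  intro p hp
  rcases (PySem.List.mem_enumerate_iff _ _ _).mp hp with ⟨k, hk, rfl⟩
  simpa using h _ (List.getElem_mem hk)

-- the B loop invariant: after folding the enumeration of a nonempty ds, the state is
-- (min, max, titles at min indices, titles at max indices)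
theorem B_char (courses : List String) (ds : List Int) (x0 : Int) (h0 : ds.head? = some x0) :
    (PySem.List.enumerate ds 0).foldl (bStep courses) (x0, x0, [], []) =
      (mval ds, Mval ds,
       (idxOf ds (mval ds)).map (fun i => (PySem.List.pyGet? courses i).getD ""),
       (idxOf ds (Mval ds)).map (fun i => (PySem.List.pyGet? courses i).getD "")) := by
  induction ds using List.reverseRecOn with
  | nil => simp at h0
  | append_singleton l d ih =>
    by_cases hl : l = []
    · subst hl
      simp only [List.nil_append, List.head?_cons, Option.some.injEq] at h0
      subst h0
      simp [bStep, mval, Mval, idxOf, PySem.List.enumerate_cons, PySem.List.enumerate_nil]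
    · have h0' : l.head? = some x0 := by
        cases l with
        | nil => exact absurd rfl hl
        | cons a t => simpa using h0
      rw [PySem.List.enumerate_append, List.foldl_append, ih h0',
        mval_append _ hl, Mval_append _ hl]
      simp only [PySem.List.enumerate_cons, PySem.List.enumerate_nil, List.foldl_cons,
        List.foldl_nil, zero_add]
      have hmin : ∀ x ∈ l, mval l ≤ x := fun x hx => mval_le _ x hx
      have hmax : ∀ x ∈ l, x ≤ Mval l := fun x hx => le_Mval _ x hx
      have hmM : mval l ≤ Mval l :=
        le_trans (hmin _ (List.head_mem hl)) (hmax _ (List.head_mem hl))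
      rcases lt_trichotomy d (mval l) with h1 | h1 | h1 <;>
        rcases lt_trichotomy (Mval l) d with h2 | h2 | h2
      · omega
      · omega
      · -- d < min (new min); max untouched
        have hnil : idxOf l d = [] :=
          idxOf_nil_of_ne _ _ (fun x hx hxd => by have := hmin x hx; omega)
        rw [idxOf_append, idxOf_append]
        simp [bStep, h1, min_eq_right h1.le, max_eq_left (le_of_lt h2),
          not_lt.mpr (le_of_lt h2), show (d == Mval l) = false by simp; omega,
          show d ≠ Mval l by omega, hnil]
      · omega
      · -- d = min = max (constant so far): append to both
        rw [idxOf_append, idxOf_append]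
        simp [bStep, ← h1, h2, min_self, max_self]
      · -- d = min < max: append to min list, max untouched
        rw [idxOf_append, idxOf_append]
        simp [bStep, ← h1, not_lt.mpr (le_of_lt h2), min_self,
          max_eq_left (le_of_lt h2), show (d == Mval l) = false by simp; omega,
          show d ≠ Mval l by omega]
      · -- min < d, max < d (new max); min untouched
        have hnil : idxOf l d = [] :=
          idxOf_nil_of_ne _ _ (fun x hx hxd => by have := hmax x hx; omega)
        rw [idxOf_append, idxOf_append]
        simp [bStep, h2, not_lt.mpr h1.le, min_eq_left h1.le, max_eq_right (le_of_lt h2),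
          show (d == mval l) = false by simp; omega, show d ≠ mval l by omega, hnil]
      · -- min < d = max: append to max list, min untouched
        rw [idxOf_append, idxOf_append]
        simp [bStep, ← h2, max_self, not_lt.mpr hmM, min_eq_left hmM,
          show ¬(Mval l = mval l) by omega]
      · -- min < d < max: both untouched
        rw [idxOf_append, idxOf_append]
        simp [bStep, not_lt.mpr h1.le, not_lt.mpr (le_of_lt h2), min_eq_left h1.le,
          max_eq_left (le_of_lt h2), show (d == mval l) = false by simp; omega,
          show (d == Mval l) = false by simp; omega, show d ≠ mval l by omega,
          show d ≠ Mval l by omega]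

-- titles read through A's zip-built courses_list agree with titles read directly from courses
-- on every index that holds an extremal duration (those are in range by Pre_)
theorem map_title_eq (courses : List String) (mentors : List (List String)) (ds : List Int)
    (v : Int)
    (hidx : ∀ k < ds.length,
      (some (ds.getD k 0) = ds.min? ∨ some (ds.getD k 0) = ds.max?) →
      (k < courses.length ∧ k < mentors.length))
    (hv : some v = ds.min? ∨ some v = ds.max?) :
    (idxOf ds v).map (fun i =>
        ((PySem.List.pyGet? ((courses.zip (mentors.zip ds)).foldl
            (fun acc tmd => acc ++ [(tmd.1, tmd.2.1, tmd.2.2)]) []) i).map (fun cd => cd.1)).getD "")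
      = (idxOf ds v).map (fun i => (PySem.List.pyGet? courses i).getD "") := by
  apply List.map_congr_left
  intro i hi
  rcases List.mem_map.mp hi with ⟨q, hq, rfl⟩
  rcases List.mem_filter.mp hq with ⟨hqe, hqv⟩
  rcases (PySem.List.mem_enumerate_iff _ _ _).mp hqe with ⟨k, hk, rfl⟩
  simp only [beq_iff_eq] at hqv
  have hkv : ds.getD k 0 = v := by rw [List.getD_eq_getElem ds 0 hk]; exact hqv
  obtain ⟨hkc, hkm⟩ := hidx k hk (by rw [hkv]; exact hv)
  have hzip : ((courses.zip (mentors.zip ds)).foldl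
      (fun acc tmd => acc ++ [(tmd.1, tmd.2.1, tmd.2.2)]) ([] : List (String × List String × Int)))
      = courses.zip (mentors.zip ds) := by
    rw [PySem.List.foldl_append_singleton_eq_map]
    simp
  rw [hzip]
  have hkz : k < (courses.zip (mentors.zip ds)).length := by
    simp [List.length_zip]; omega
  simp [PySem.List.pyGet?_natCast, List.getElem?_eq_getElem hkz,
    List.getElem?_eq_getElem hkc, List.getElem_zip]

-- ===== VERDICT (by name: the statement is the Claim_ definition above) =====
theorem analyze_courses_spec : Claim_equal_analyze_courses := by
  intro courses mentors durations _hdom hpre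
  obtain ⟨hne, hidx⟩ := hpre
  unfold Spec_analyze_courses
  cases durations with
  | nil => exact absurd rfl hne
  | cons d0 rest =>
    show analyze_courses courses mentors (d0 :: rest) =
      (PySem.List.enumerate (d0 :: rest) 0).foldl (bStep courses) (d0, d0, [], [])
    rw [B_char courses (d0 :: rest) d0 rfl]
    unfold analyze_courses
    rw [PySem.List.min?_id_cons, PySem.List.max?_id_cons]
    have hmn : (d0 :: rest).min? = some (mval (d0 :: rest)) := by
      rw [List.min?_cons']; rfl
    have hmx : (d0 :: rest).max? = some (Mval (d0 :: rest)) := by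
      rw [List.max?_cons']; rfl
    refine congrArg _ (congrArg _ ?_)
    exact Prod.ext
      (map_title_eq courses mentors _ _ hidx (Or.inl hmn.symm))
      (map_title_eq courses mentors _ _ hidx (Or.inr hmx.symm))
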